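-- pv_equiv track=rewrite | github.com/tarnheld/ted-editor | src/read_ted.py | fmt_to_spec_and_fields
-- ===== SOURCE A (Python) =====
-- def fmt_to_spec_and_fields(fmt):
--     spec=""
--     fields=""
--     for line in fmt.splitlines():
--         for token in line.split():
--             s,f = token.split(":")
--             spec   += s
--             fields += f + " "
--
--     return spec,fields
-- ===== SOURCE B (Python) =====
-- def fmt_to_spec_and_fields(fmt):
--     # single character-level scan (a small state machine): no splitlines/split at all
--     spec = ""
--     fields = ""
--     pieces = None   # colon-separated pieces of the token being read; None between tokens
--     for ch in fmt:
--         if ch.isspace():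
--             if pieces is not None:
--                 s, f = pieces
--                 spec += s
--                 fields += f + " "
--                 pieces = None
--         elif ch == ":":
--             pieces = [""] if pieces is None else pieces
--             pieces.append("")
--         else:
--             pieces = [""] if pieces is None else pieces
--             pieces[-1] += ch
--     if pieces is not None:
--         s, f = pieces
--         spec += s
--         fields += f + " "
--     return spec, fields
-- ===== Notes on version B (the rewrite author's own statement) =====
-- stated objective: alternative
-- what changed: B replaces A's nested splitlines/split/colon-split passes with a single character-level state machine that scans fmt once, building the colon-separated pieces of the current token incrementally and flushing them at each whitespace boundary.
import Mathlib
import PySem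

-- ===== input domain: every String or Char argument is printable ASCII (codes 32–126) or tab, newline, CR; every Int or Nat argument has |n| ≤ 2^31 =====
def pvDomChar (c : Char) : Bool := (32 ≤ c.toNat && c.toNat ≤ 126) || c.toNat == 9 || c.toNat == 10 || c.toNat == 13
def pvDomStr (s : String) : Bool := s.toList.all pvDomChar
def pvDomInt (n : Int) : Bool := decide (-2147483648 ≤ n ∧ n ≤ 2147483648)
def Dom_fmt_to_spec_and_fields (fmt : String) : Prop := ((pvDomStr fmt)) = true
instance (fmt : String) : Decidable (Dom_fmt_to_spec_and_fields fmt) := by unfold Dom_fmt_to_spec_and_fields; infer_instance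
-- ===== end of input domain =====

-- B replaces A's nested splitlines/split passes with one character-level state-machine scan of fmt (objective: alternative).


-- ===== PORT A =====
-- literal port of A: for line in fmt.splitlines(): for token in line.split(): unpack the colon-split of the token into s,f; spec += s; fields += f + " "
-- the `| _ => st` branch is where Python raises ValueError (the two-element unpack fails); Pre_ excludes it
def fmt_to_spec_and_fields (fmt : String) : String × String :=
  let res := (PySem.Chars.splitlines fmt.toList).foldl (fun st line =>
      (PySem.Chars.split₀ line).foldl (fun (st : List Char × List Char) tok =>
        match PySem.Chars.splitOn tok [':'] with
        | [s, f] => (st.1 ++ s, st.2 ++ f ++ [' '])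
        | _ => st) st) ([], [])
  (String.ofList res.1, String.ofList res.2)

-- ===== PORT B =====
-- B-side helpers: pieces[-1] += ch (the [] case is unreachable: pieces is always nonempty)
def pvAddLast : List (List Char) → Char → List (List Char)
  | [], c => [[c]]
  | [p], c => [p ++ [c]]
  | p :: q :: ps, c => p :: pvAddLast (q :: ps) c

-- `s, f = pieces; spec += s; fields += f + " "`: the 2-unpack succeeds iff pieces has length 2,
-- with s = pieces[0] and f = pieces[1]; the else branch is Python's ValueError, excluded by Pre_
def pvFlushPair (ab : List Char × List Char) (ps : List (List Char)) : List Char × List Char :=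
  if ps.length = 2 then (ab.1 ++ ps.getD 0 [], ab.2 ++ ps.getD 1 [] ++ [' ']) else ab

-- B's loop body: one character of the state machine
def pvStep (st : (List Char × List Char) × Option (List (List Char))) (ch : Char) :
    (List Char × List Char) × Option (List (List Char)) :=
  if PySem.Chars.isspace ch then
    match st.2 with
    | some ps => (pvFlushPair st.1 ps, none)
    | none => st
  else if ch = ':' then
    (st.1, some ((st.2.getD [[]]) ++ [[]]))
  else
    (st.1, some (pvAddLast (st.2.getD [[]]) ch))

-- literal port of B: fold pvStep over the characters, then the final flush of a pending token
def fmt_to_spec_and_fields_alt (fmt : String) : String × String :=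
  let st := fmt.toList.foldl pvStep (([], []), none)
  let fin := match st.2 with
    | some ps => pvFlushPair st.1 ps
    | none => st.1
  (String.ofList fin.1, String.ofList fin.2)

-- ===== PRECONDITION & SPEC =====
-- Pre_: exactly where the Python A returns normally — every whitespace-separated token splits at the colon into
-- exactly two pieces (otherwise the two-element unpack of the colon-split raises ValueError; B raises there too)
def Pre_fmt_to_spec_and_fields (fmt : String) : Prop :=
  ∀ t ∈ PySem.Chars.split₀ fmt.toList, (PySem.Chars.splitOn t [':']).length = 2
instance (fmt : String) : Decidable (Pre_fmt_to_spec_and_fields fmt) := by unfold Pre_fmt_to_spec_and_fields; infer_instance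

def pvWitness_fmt_to_spec_and_fields : String := "pos:x y:2\nnrm:n"

def Spec_fmt_to_spec_and_fields (fmt : String) (out : String × String) : Prop := out = fmt_to_spec_and_fields_alt fmt
instance (fmt : String) (out : String × String) : Decidable (Spec_fmt_to_spec_and_fields fmt out) := by unfold Spec_fmt_to_spec_and_fields; infer_instance

-- ===== CLAIM (what is proved, stated in full; the proofs are below) =====
def Claim_equal_fmt_to_spec_and_fields : Prop := ∀ (fmt : String), Dom_fmt_to_spec_and_fields fmt → Pre_fmt_to_spec_and_fields fmt → Spec_fmt_to_spec_and_fields fmt (fmt_to_spec_and_fields fmt)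

-- ===== LEMMAS AND PROOFS =====

-- A's inner token step, named
def tstep (st : List Char × List Char) (tok : List Char) : List Char × List Char :=
  pvFlushPair st (PySem.Chars.splitOn tok [':'])

-- the final flush of B, named
def pvFinish (st : (List Char × List Char) × Option (List (List Char))) : List Char × List Char :=
  match st.2 with
  | some ps => pvFlushPair st.1 ps
  | none => st.1

-- fuel-free front-to-back recursion computing splitOn · [':']
def cgo : List Char → List Char → List (List Char) → List (List Char)
  | [], cur, acc => (cur.reverse :: acc).reverse
  | c :: rest, cur, acc => if c = ':' then cgo rest [] (cur.reverse :: acc) else cgo rest (c :: cur) acc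

-- B's pieces state for the partial token w (none between tokens)
def pst (w : List Char) : Option (List (List Char)) := if w = [] then none else some (cgo w [] [])

theorem go_eq_cgo (l : List Char) : ∀ (fuel : ℕ), l.length ≤ fuel → ∀ cur acc,
    PySem.Chars.splitOn.go [':'] fuel l cur acc = cgo l cur acc := by
  induction l with
  | nil =>
    intro fuel _ cur acc
    cases fuel <;> simp [PySem.Chars.splitOn.go, cgo]
  | cons c rest ih =>
    intro fuel hf cur acc
    cases fuel with
    | zero => simp at hf
    | succ f =>
      rw [PySem.Chars.splitOn.go]
      by_cases hc : c = ':'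
      · subst hc
        simp [List.isPrefixOf, cgo, ih f (by simpa using hf)]
      · have : ([':'].isPrefixOf (c :: rest)) = false := by
          simp [List.isPrefixOf]; exact fun h => (hc h.symm).elim
        simp [this, cgo, hc, ih f (by simpa using hf)]

theorem splitOn_eq_cgo (w : List Char) : PySem.Chars.splitOn w [':'] = cgo w [] [] := by
  unfold PySem.Chars.splitOn
  exact go_eq_cgo w (w.length + 1) (by omega) [] []

theorem addLast_append (xs : List (List Char)) (p : List Char) (c : Char) :
    pvAddLast (xs ++ [p]) c = xs ++ [p ++ [c]] := by
  induction xs with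
  | nil => simp [pvAddLast]
  | cons x xs ih =>
    cases xs with
    | nil => simp [pvAddLast]
    | cons y ys => simpa [pvAddLast] using ih

theorem cgo_colon (w : List Char) : ∀ cur acc, cgo (w ++ [':']) cur acc = cgo w cur acc ++ [[]] := by
  induction w with
  | nil => intro cur acc; simp [cgo]
  | cons c w ih =>
    intro cur acc
    by_cases hc : c = ':' <;> simp [cgo, hc, ih]

theorem cgo_char (w : List Char) {c : Char} (hc : c ≠ ':') :
    ∀ cur acc, cgo (w ++ [c]) cur acc = pvAddLast (cgo w cur acc) c := by
  induction w with
  | nil =>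
    intro cur acc
    simp [cgo, hc, addLast_append acc.reverse cur.reverse c]
  | cons d w ih =>
    intro cur acc
    by_cases hd : d = ':' <;> simp [cgo, hd, ih]

-- split₀.go is accumulator-independent
theorem sp_acc (cs : List Char) : ∀ cur acc, PySem.Chars.split₀.go cs cur acc = acc.reverse ++ PySem.Chars.split₀.go cs cur [] := by
  induction cs with
  | nil => intro cur acc; simp [PySem.Chars.split₀.go]; split <;> simp
  | cons c rest ih =>
    intro cur acc
    simp only [PySem.Chars.split₀.go]
    split
    · split
      · exact ih [] acc
      · rw [ih [] (cur.reverse :: acc), ih [] [cur.reverse]]; simp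
    · exact ih (c :: cur) acc

-- THE SCAN LEMMA: B's character state machine, started mid-token w, computes A's fold over the remaining tokens
theorem scan_go (cs : List Char) : ∀ (w a b : List Char),
    pvFinish (cs.foldl pvStep ((a, b), pst w)) =
      (PySem.Chars.split₀.go cs w.reverse []).foldl tstep (a, b) := by
  induction cs with
  | nil =>
    intro w a b
    by_cases hw : w = []
    · subst hw; simp [pvFinish, pst, PySem.Chars.split₀.go]
    · simp [pvFinish, pst, hw, PySem.Chars.split₀.go, tstep, splitOn_eq_cgo]
  | cons c cs ih =>
    intro w a b
    simp only [List.foldl_cons]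
    by_cases hsp : PySem.Chars.isspace c
    · by_cases hw : w = []
      · subst hw
        have h1 : pvStep ((a, b), pst []) c = ((a, b), pst []) := by
          simp [pvStep, hsp, pst]
        rw [h1, ih [] a b]
        simp [PySem.Chars.split₀.go, hsp]
      · have h1 : pvStep ((a, b), pst w) c = (tstep (a, b) w, pst []) := by
          simp [pvStep, hsp, pst, hw, tstep, splitOn_eq_cgo]
        rw [h1]
        have h2 : (tstep (a, b) w) = ((tstep (a, b) w).1, (tstep (a, b) w).2) := rfl
        rw [h2, ih [] (tstep (a, b) w).1 (tstep (a, b) w).2]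
        have h3 : PySem.Chars.split₀.go (c :: cs) w.reverse [] =
            [w] ++ PySem.Chars.split₀.go cs [] [] := by
          simp only [PySem.Chars.split₀.go, hsp, if_pos]
          have : w.reverse.isEmpty = false := by
            cases w with | nil => exact (hw rfl).elim | cons x xs => simp
          rw [this]
          simp only [Bool.false_eq_true, if_false]
          rw [sp_acc cs [] [w.reverse.reverse]]
          simp
        rw [h3]
        simp
    · have hwc : w ++ [c] ≠ [] := by simp
      have hstate : pvStep ((a, b), pst w) c = ((a, b), pst (w ++ [c])) := by
        by_cases hc : c = ':'
        · subst hc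
          by_cases hw : w = []
          · subst hw; simp [pvStep, hsp, pst, cgo]
          · simp [pvStep, hsp, pst, hw, cgo_colon]
        · by_cases hw : w = []
          · subst hw; simp [pvStep, hsp, hc, pst, pvAddLast, cgo]
          · simp [pvStep, hsp, hc, pst, hw, cgo_char w hc]
      rw [hstate, ih (w ++ [c]) a b]
      have : PySem.Chars.split₀.go (c :: cs) w.reverse [] =
          PySem.Chars.split₀.go cs (w ++ [c]).reverse [] := by
        simp [PySem.Chars.split₀.go, hsp]
      rw [this]

-- splitlines' line-break predicate, named (it is an inline lambda in PySem.Chars.splitlines)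
def brChar (c : Char) : Bool :=
  have n := c.toNat
  decide (n = 10) || decide (n = 13) || decide (n = 11) || decide (n = 12) || decide (n = 28) || decide (n = 29) ||
      decide (n = 30) || decide (n = 133) || decide (n = 8232) || decide (n = 8233)

theorem splitlines_eq (cs : List Char) : PySem.Chars.splitlines cs = PySem.Chars.splitlines.go brChar cs [] [] := rfl

theorem ws_of_br {c : Char} (h : brChar c = true) : PySem.Chars.isspace c = true := by
  simp [brChar] at h
  simp [PySem.Chars.isspace]
  omega

-- split₀ cuts cleanly at any whitespace character
theorem split₀_append_ws {b : Char} (hb : PySem.Chars.isspace b = true) (ys : List Char) :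
    ∀ (xs cur : List Char) (acc : List (List Char)),
      PySem.Chars.split₀.go (xs ++ b :: ys) cur acc =
        PySem.Chars.split₀.go xs cur acc ++ PySem.Chars.split₀ ys := by
  intro xs
  induction xs with
  | nil =>
    intro cur acc
    by_cases hc : cur = []
    · subst hc
      simp only [List.nil_append, PySem.Chars.split₀.go, hb]
      simp [sp_acc ys [] acc, PySem.Chars.split₀]
    · simp only [List.nil_append, PySem.Chars.split₀.go, hb]
      simp [hc, sp_acc ys [] (cur.reverse :: acc), PySem.Chars.split₀]
  | cons x xs ih =>
    intro cur acc
    simp only [List.cons_append, PySem.Chars.split₀.go]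
    split
    · split
      · exact ih [] acc
      · exact ih [] (cur.reverse :: acc)
    · exact ih (x :: cur) acc

-- one step of splitlines.go away from the '\r\n' special pattern
theorem sl_step (c : Char) (rest cur : List Char) (acc : List (List Char))
    (hne : ∀ rest1, c = '\x0d' → rest = '\n' :: rest1 → False) :
    PySem.Chars.splitlines.go brChar (c :: rest) cur acc =
      if brChar c = true then PySem.Chars.splitlines.go brChar rest [] (cur.reverse :: acc)
      else PySem.Chars.splitlines.go brChar rest (c :: cur) acc := by
  rw [PySem.Chars.splitlines.go.eq_def]
  split
  · simp_all
  · rename_i h; injection h with h1 h2; exact (hne _ h1 h2).elim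
  · rename_i h; injection h with h1 h2; subst h1; subst h2; rfl

-- splitlines.go is accumulator-independent
theorem sl_acc (cs cur : List Char) : ∀ (acc : List (List Char)),
    PySem.Chars.splitlines.go brChar cs cur acc = acc.reverse ++ PySem.Chars.splitlines.go brChar cs cur [] := by
  have a0 : List (List Char) := []
  induction cs, cur, a0 using PySem.Chars.splitlines.go.induct brChar with
  | case1 cur _ h => intro acc; simp [PySem.Chars.splitlines.go, h]
  | case2 cur _ h => intro acc; simp [PySem.Chars.splitlines.go, h]
  | case3 rest cur _ ih =>
    intro acc
    simp only [PySem.Chars.splitlines.go]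
    rw [ih (cur.reverse :: acc), ih [cur.reverse]]; simp
  | case4 c rest cur _ hne hbr ih =>
    intro acc
    rw [sl_step c rest cur acc hne, sl_step c rest cur [] hne, if_pos hbr, if_pos hbr]
    rw [ih (cur.reverse :: acc), ih [cur.reverse]]; simp
  | case5 c rest cur _ hne hbr ih =>
    intro acc
    rw [sl_step c rest cur acc hne, sl_step c rest cur [] hne, if_neg hbr, if_neg hbr]
    exact ih acc

-- the key structural fact, generalized over splitlines' running line
theorem flatMap_split₀_go (cs cur : List Char) : ∀ (_ : Unit),
    (PySem.Chars.splitlines.go brChar cs cur []).flatMap PySem.Chars.split₀ =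
      PySem.Chars.split₀ (cur.reverse ++ cs) := by
  have a0 : List (List Char) := []
  induction cs, cur, a0 using PySem.Chars.splitlines.go.induct brChar with
  | case1 cur _ h =>
    intro _
    have : cur = [] := by simpa using h
    subst this
    simp [PySem.Chars.splitlines.go, PySem.Chars.split₀, PySem.Chars.split₀.go]
  | case2 cur _ h =>
    intro _
    simp [PySem.Chars.splitlines.go, h, PySem.Chars.split₀]
  | case3 rest cur _ ih =>
    intro _
    simp only [PySem.Chars.splitlines.go]
    rw [sl_acc rest [] [cur.reverse]]
    have hws : PySem.Chars.isspace '\x0d' = true := by decide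
    have hws2 : PySem.Chars.isspace '\n' = true := by decide
    simp only [List.flatMap_append, List.flatMap_cons, List.flatMap_nil,
      List.reverse_cons, List.reverse_nil, List.nil_append, List.append_nil]
    rw [ih ()]
    rw [show PySem.Chars.split₀ (cur.reverse ++ '\x0d' :: '\n' :: rest) =
          PySem.Chars.split₀.go (cur.reverse ++ '\x0d' :: ('\n' :: rest)) [] [] from rfl]
    rw [split₀_append_ws hws ('\n' :: rest) cur.reverse [] []]
    rw [show PySem.Chars.split₀ ('\n' :: rest) = PySem.Chars.split₀.go ([] ++ '\n' :: rest) [] [] from rfl]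
    rw [split₀_append_ws hws2 rest [] [] []]
    simp [PySem.Chars.split₀, PySem.Chars.split₀.go]
  | case4 c rest cur _ hne hbr ih =>
    intro _
    rw [sl_step c rest cur [] hne, if_pos hbr]
    rw [sl_acc rest [] [cur.reverse]]
    simp only [List.flatMap_append, List.flatMap_cons, List.flatMap_nil,
      List.reverse_cons, List.reverse_nil, List.nil_append, List.append_nil]
    rw [ih ()]
    rw [show PySem.Chars.split₀ (cur.reverse ++ c :: rest) =
          PySem.Chars.split₀.go (cur.reverse ++ c :: rest) [] [] from rfl]
    rw [split₀_append_ws (ws_of_br hbr) rest cur.reverse [] []]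
    simp [PySem.Chars.split₀]
  | case5 c rest cur _ hne hbr ih =>
    intro _
    rw [sl_step c rest cur [] hne, if_neg hbr]
    rw [ih ()]
    simp

-- flattening splitlines then per-line split₀ is whole-string split₀
theorem flatMap_split₀_splitlines (cs : List Char) :
    (PySem.Chars.splitlines cs).flatMap PySem.Chars.split₀ = PySem.Chars.split₀ cs := by
  rw [splitlines_eq]
  simpa using flatMap_split₀_go cs [] ()

-- ===== VERDICT (by name: the statement is the Claim_ definition above) =====
theorem fmt_to_spec_and_fields_spec : Claim_equal_fmt_to_spec_and_fields := by
  intro fmt _ _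
  unfold Spec_fmt_to_spec_and_fields fmt_to_spec_and_fields fmt_to_spec_and_fields_alt
  have hstep : (fun (st : List Char × List Char) tok =>
      match PySem.Chars.splitOn tok [':'] with
      | [s, f] => (st.1 ++ s, st.2 ++ f ++ [' '])
      | _ => st) = tstep := by
    funext st tok
    simp only [tstep, pvFlushPair]
    rcases PySem.Chars.splitOn tok [':'] with _ | ⟨s, _ | ⟨f, _ | ⟨z, r⟩⟩⟩ <;> simp
  simp only [hstep, ← List.foldl_flatMap, flatMap_split₀_splitlines]
  have := (scan_go fmt.toList [] [] []).symm
  simp only [pst, List.reverse_nil] at this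
  rw [show PySem.Chars.split₀ fmt.toList = PySem.Chars.split₀.go fmt.toList [] [] from rfl]
  rw [this]
  rfl
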